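-- pv_equiv track=rewrite | github.com/mewisss/adventofcode2022 | day-3/d3.py | splitAndCompare
-- ===== SOURCE A (Python) =====
-- def splitAndCompare(str):
--     # Split into 2 strings
--     retVal = ""
--     fp, sp = str[:len(str)//2], str[len(str)//2:]
--
--     # Compare Each Value
--     for i in range(len(fp)):
--         for j in range(len(sp)):
--             if fp[i] == sp[j]:
--                 retVal=fp[i]
--
--     return(retVal)
-- ===== SOURCE B (Python) =====
-- def splitAndCompare(str):
--     # Last first-half char (by position) that also occurs in the second half.
--     h = len(str) // 2
--     fp, sp = str[:h], str[h:]
--     spSet = set(sp)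
--     for c in reversed(fp):
--         if c in spSet:
--             return c
--     return ""
-- ===== Notes on version B (the rewrite author's own statement) =====
-- stated objective: faster
-- what changed: Replaces the quadratic nested index loops (which overwrite retVal on every match, keeping the last first-half position) by one set of the second half and a single reversed scan of the first half with an early return.
import Mathlib
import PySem

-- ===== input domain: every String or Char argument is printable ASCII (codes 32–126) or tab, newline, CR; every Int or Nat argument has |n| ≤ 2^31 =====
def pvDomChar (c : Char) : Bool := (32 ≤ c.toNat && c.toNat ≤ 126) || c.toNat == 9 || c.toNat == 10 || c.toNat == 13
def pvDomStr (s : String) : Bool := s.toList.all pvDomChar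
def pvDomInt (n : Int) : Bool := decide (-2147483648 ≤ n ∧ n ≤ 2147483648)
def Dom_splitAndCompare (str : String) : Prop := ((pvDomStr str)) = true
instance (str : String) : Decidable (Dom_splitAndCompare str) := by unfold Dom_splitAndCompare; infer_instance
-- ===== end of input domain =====

-- B replaces A's quadratic nested index loops by one set of the second half and a
-- single reversed scan of the first half with an early return (objective: faster).

-- ===== PORT A =====
def splitAndCompare (str : String) : String :=
  let s := str.toList
  let h := PySem.Int.floordiv (s.length : Int) 2
  let fp := PySem.List.slice s none (some h)
  let sp := PySem.List.slice s (some h) none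
  (PySem.List.pyRange 0 (fp.length : Int) 1).foldl (fun r i =>
    (PySem.List.pyRange 0 (sp.length : Int) 1).foldl (fun r j =>
      if PySem.List.pyGetD fp i ' ' = PySem.List.pyGetD sp j ' ' then
        String.ofList [PySem.List.pyGetD fp i ' ']
      else r) r) ""

-- ===== PORT B =====
def splitAndCompare_alt (str : String) : String :=
  let s := str.toList
  let h := PySem.Int.floordiv (s.length : Int) 2
  let fp := PySem.List.slice s none (some h)
  let sp := PySem.List.slice s (some h) none
  let spSet : PySem.Set Char := PySem.Set.ofList sp
  match fp.reverse.find? (fun c => PySem.Set.contains spSet c) with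
  | some c => String.ofList [c]
  | none => ""

-- ===== PRECONDITION & SPEC =====
def Spec_splitAndCompare (str : String) (out : String) : Prop := out = splitAndCompare_alt str
instance (str : String) (out : String) : Decidable (Spec_splitAndCompare str out) := by unfold Spec_splitAndCompare; infer_instance

-- ===== CLAIM (what is proved, stated in full; the proofs are below) =====
def Claim_equal_splitAndCompare : Prop := ∀ (str : String), Dom_splitAndCompare str → Spec_splitAndCompare str (splitAndCompare str)

-- ===== LEMMAS AND PROOFS =====

-- A's inner loop over sp: overwrite r with x whenever a match is found.
theorem inner_loop_char (sp : List Char) (x : Char) (r : String) :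
    sp.foldl (fun r c => if x = c then String.ofList [x] else r) r
      = if x ∈ sp then String.ofList [x] else r := by
  induction sp generalizing r with
  | nil => simp
  | cons a t ih =>
      simp only [List.foldl_cons, ih, List.mem_cons]
      by_cases hxa : x = a <;> by_cases hxt : x ∈ t <;> simp [hxa, hxt]

-- last match of a left fold = first match of the reversed list
theorem foldl_if_eq_find?_reverse (p : Char → Prop) [DecidablePred p] (g : Char → String)
    (l : List Char) (init : String) :
    l.foldl (fun r c => if p c then g c else r) init
      = (match l.reverse.find? (fun c => decide (p c)) with
         | some c => g c
         | none => init) := by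
  induction l generalizing init with
  | nil => simp
  | cons a t ih =>
      simp only [List.foldl_cons, List.reverse_cons, List.find?_append, ih]
      cases hf : t.reverse.find? (fun c => decide (p c)) with
      | some c => simp
      | none =>
          by_cases hpa : p a <;> simp [hpa, List.find?]

theorem splitAndCompare_spec_aux (str : String) :
    splitAndCompare str = splitAndCompare_alt str := by
  unfold splitAndCompare splitAndCompare_alt
  simp only []
  set s := str.toList with hs
  set h := PySem.Int.floordiv (s.length : Int) 2 with hh
  set fp := PySem.List.slice s none (some h) with hfp
  set sp := PySem.List.slice s (some h) none with hsp
  -- inner loop is a fold over sp via pyGetD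
  have inner : ∀ (x : Char) (r : String),
      (PySem.List.pyRange 0 (sp.length : Int) 1).foldl (fun r j =>
        if x = PySem.List.pyGetD sp j ' ' then String.ofList [x] else r) r
        = if x ∈ sp then String.ofList [x] else r := by
    intro x r
    rw [PySem.List.foldl_pyRange_zero_pyGetD' sp ' '
      (fun r c => if x = c then String.ofList [x] else r) r]
    exact inner_loop_char sp x r
  have outer :
      (PySem.List.pyRange 0 (fp.length : Int) 1).foldl (fun r i =>
        (PySem.List.pyRange 0 (sp.length : Int) 1).foldl (fun r j =>
          if PySem.List.pyGetD fp i ' ' = PySem.List.pyGetD sp j ' ' then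
            String.ofList [PySem.List.pyGetD fp i ' ']
          else r) r) ""
      = fp.foldl (fun r c => if c ∈ sp then String.ofList [c] else r) "" := by
    have := PySem.List.foldl_pyRange_zero_pyGetD' fp ' '
      (fun (r : String) (c : Char) => if c ∈ sp then String.ofList [c] else r) ""
    rw [← this]
    apply PySem.List.foldl_congr_mem
    intro r i _
    rw [inner]
  rw [outer, foldl_if_eq_find?_reverse (fun c => c ∈ sp) (fun c => String.ofList [c]) fp ""]
  have hpred : (fun c => PySem.Set.contains (PySem.Set.ofList sp) c)
      = (fun c => decide (c ∈ sp)) := by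
    funext c
    simp [PySem.Set.contains, PySem.Set.mem_ofList]
  rw [hpred]

-- ===== VERDICT (by name: the statement is the Claim_ definition above) =====
theorem splitAndCompare_spec : Claim_equal_splitAndCompare := by
  intro str _
  unfold Spec_splitAndCompare
  exact splitAndCompare_spec_aux str
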